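-- pv_equiv track=rewrite | github.com/snji-khjuria/ecommerce-bot | normalizers/memory_attribute.py | keyHasMemorySignal
-- ===== SOURCE A (Python) =====
-- def keyHasMemorySignal(k):
--     k = k.lower()
--     k_words = k.split()
--     memory_signals = ["memory", "storage", "ram", "hdd", "external", "cache"]
--     for w in memory_signals:
--         if w in k_words:
--             return True
--     return False
-- ===== SOURCE B (Python) =====
-- _SIGNALS = frozenset(("memory", "storage", "ram", "hdd", "external", "cache"))
--
-- def keyHasMemorySignal(k):
--     # single pass over the characters: build each whitespace-delimited word
--     # (lowercased char by char) and test it as soon as it is complete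
--     word = ""
--     for c in k:
--         if c.isspace():
--             if word in _SIGNALS:
--                 return True
--             word = ""
--         else:
--             word += c.lower()
--     return word in _SIGNALS
-- ===== Notes on version B (the rewrite author's own statement) =====
-- stated objective: alternative
-- what changed: Instead of splitting the key and looping over the six signal words testing membership in the word list, B makes a single character-level pass over the raw key, tokenizing it itself (lowercasing char by char) and testing each completed word against a frozenset of signals with early return.
import Mathlib
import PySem

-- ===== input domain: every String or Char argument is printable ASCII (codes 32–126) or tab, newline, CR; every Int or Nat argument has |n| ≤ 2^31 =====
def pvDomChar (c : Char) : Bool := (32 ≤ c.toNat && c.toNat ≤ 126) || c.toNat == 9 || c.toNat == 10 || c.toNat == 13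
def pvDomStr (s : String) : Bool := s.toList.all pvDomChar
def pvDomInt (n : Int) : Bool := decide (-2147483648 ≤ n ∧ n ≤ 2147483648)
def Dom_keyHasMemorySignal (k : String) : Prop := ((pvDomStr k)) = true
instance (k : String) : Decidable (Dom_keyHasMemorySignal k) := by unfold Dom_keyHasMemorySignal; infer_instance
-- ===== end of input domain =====

-- B replaces A's split-then-loop-over-signals by a single character scan that tokenizes the key itself and tests each completed word against a signal set (alternative decomposition, same cost class).


-- ===== PORT A =====
-- the 'for w in memory_signals: if w in k_words: return True' loop, early return and all
def keyHasMemorySignalLoop (signals : List String) (kWords : List String) : Bool :=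
  match signals with
  | [] => false
  | w :: rest => if kWords.contains w then true else keyHasMemorySignalLoop rest kWords

def keyHasMemorySignal (k : String) : Bool :=
  let k := PySem.Str.lower k
  let kWords := PySem.Str.split₀ k
  let memorySignals : List String := ["memory", "storage", "ram", "hdd", "external", "cache"]
  keyHasMemorySignalLoop memorySignals kWords

-- ===== PORT B =====
-- the frozenset _SIGNALS; B builds each word char by char, so the words live as char lists
def sigChars : List (List Char) :=
  ["memory".toList, "storage".toList, "ram".toList, "hdd".toList, "external".toList, "cache".toList]

-- the 'for c in k' scan: the current word accumulated in order, tested when complete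
def scanChars (cs : List Char) (word : List Char) : Bool :=
  match cs with
  | [] => sigChars.contains word
  | c :: rest =>
    if PySem.Chars.isspace c then
      if sigChars.contains word then true else scanChars rest []
    else
      scanChars rest (word ++ [PySem.Chars.lowerChar c])

def keyHasMemorySignal_alt (k : String) : Bool := scanChars k.toList []

-- ===== PRECONDITION & SPEC =====
def Spec_keyHasMemorySignal (k : String) (out : Bool) : Prop := out = keyHasMemorySignal_alt k
instance (k : String) (out : Bool) : Decidable (Spec_keyHasMemorySignal k out) := by unfold Spec_keyHasMemorySignal; infer_instance

-- ===== CLAIM (what is proved, stated in full; the proofs are below) =====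
def Claim_equal_keyHasMemorySignal : Prop := ∀ (k : String), Dom_keyHasMemorySignal k → Spec_keyHasMemorySignal k (keyHasMemorySignal k)

-- ===== LEMMAS AND PROOFS =====

-- lowercasing a character does not change whether it is whitespace
theorem isspace_lowerChar (c : Char) :
    PySem.Chars.isspace (PySem.Chars.lowerChar c) = PySem.Chars.isspace c := by
  unfold PySem.Chars.lowerChar
  split
  · rename_i h
    unfold PySem.Chars.isupper at h
    simp only [Bool.and_eq_true, decide_eq_true_eq] at h
    have h1 : 65 ≤ c.toNat := h.1
    have h2 : c.toNat ≤ 90 := h.2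
    have hvalid : (c.toNat + 32).isValidChar := by left; omega
    have hv : (Char.ofNat (c.toNat + 32)).toNat = c.toNat + 32 := by
      rw [Char.toNat_ofNat, if_pos hvalid]
    unfold PySem.Chars.isspace
    rw [Bool.eq_iff_iff]
    simp only [hv, Bool.or_eq_true, Bool.and_eq_true, decide_eq_true_eq]
    omega
  · rfl

-- split₀.go's accumulator only prepends already-finished words
theorem go_acc (s : List Char) (cur : List Char) (acc : List (List Char)) :
    PySem.Chars.split₀.go s cur acc = acc.reverse ++ PySem.Chars.split₀.go s cur [] := by
  induction s generalizing cur acc with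
  | nil =>
    simp only [PySem.Chars.split₀.go]
    by_cases h : cur.isEmpty <;> simp [h]
  | cons c rest ih =>
    simp only [PySem.Chars.split₀.go]
    by_cases hs : PySem.Chars.isspace c
    · by_cases h : cur.isEmpty
      · simp only [hs, h, if_true]
        exact ih [] acc
      · simp only [hs, h, if_true, if_false, Bool.false_eq_true]
        rw [ih _ (cur.reverse :: acc), ih _ [cur.reverse]]
        simp
    · simp only [hs, Bool.false_eq_true, if_false]
      exact ih _ acc

-- B's scan computes exactly 'some word of split₀(lower cs) is a signal'
theorem scan_eq (cs : List Char) (cur : List Char) :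
    scanChars cs cur =
      (PySem.Chars.split₀.go (PySem.Chars.lower cs) cur.reverse []).any
        (fun w => sigChars.contains w) := by
  induction cs generalizing cur with
  | nil =>
    simp only [scanChars, PySem.Chars.lower, List.map_nil, PySem.Chars.split₀.go]
    by_cases h : cur = []
    · subst h; simp [sigChars]
    · have : cur.reverse.isEmpty = false := by simp [h]
      simp [this]
  | cons c rest ih =>
    have hl : PySem.Chars.lower (c :: rest) = PySem.Chars.lowerChar c :: PySem.Chars.lower rest := by
      simp [PySem.Chars.lower]
    rw [hl]
    simp only [scanChars, PySem.Chars.split₀.go, isspace_lowerChar]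
    by_cases hs : PySem.Chars.isspace c
    · by_cases h : cur = []
      · subst h
        simp [hs, sigChars, ih]
      · have he : cur.reverse.isEmpty = false := by simp [h]
        simp only [hs, if_true, he, Bool.false_eq_true, if_false, List.reverse_reverse]
        rw [go_acc _ _ [cur]]
        rw [ih []]
        cases hc : sigChars.contains cur <;> simp_all
    · simp only [hs, Bool.false_eq_true, if_false]
      rw [ih]
      simp

-- A's early-return loop is 'some signal occurs among the key's words'
theorem loop_eq_true_iff (signals kWords : List String) :
    keyHasMemorySignalLoop signals kWords = true ↔ ∃ w ∈ signals, w ∈ kWords := by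
  induction signals with
  | nil => simp [keyHasMemorySignalLoop]
  | cons w rest ih =>
    simp only [keyHasMemorySignalLoop]
    by_cases h : w ∈ kWords <;> simp [h, ih]

-- bridge the char-list side of B to the String side of A
theorem scan_true_iff (k : String) :
    (PySem.Chars.split₀.go (PySem.Chars.lower k.toList) ([] : List Char).reverse []).any
        (fun w => sigChars.contains w) = true ↔
      ∃ w ∈ (["memory", "storage", "ram", "hdd", "external", "cache"] : List String),
        w ∈ PySem.Str.split₀ (PySem.Str.lower k) := by
  have h1 : PySem.Chars.lower k.toList = (PySem.Str.lower k).toList := (PySem.Str.toList_lower k).symm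
  rw [List.reverse_nil, h1]
  have h2 : PySem.Chars.split₀.go (PySem.Str.lower k).toList [] [] =
      (PySem.Str.split₀ (PySem.Str.lower k)).map String.toList := by
    rw [PySem.Str.split₀_map_toList]; rfl
  rw [h2, List.any_eq_true]
  constructor
  · rintro ⟨wc, hw, hc⟩
    simp only [List.mem_map] at hw
    obtain ⟨w, hw', rfl⟩ := hw
    simp only [sigChars, List.contains_eq_mem, decide_eq_true_eq, List.mem_cons] at hc
    refine ⟨w, ?_, hw'⟩
    simp only [List.mem_cons, List.not_mem_nil, or_false]
    rcases hc with h|h|h|h|h|h|h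
    · exact Or.inl (String.toList_inj.mp h)
    · exact Or.inr (Or.inl (String.toList_inj.mp h))
    · exact Or.inr (Or.inr (Or.inl (String.toList_inj.mp h)))
    · exact Or.inr (Or.inr (Or.inr (Or.inl (String.toList_inj.mp h))))
    · exact Or.inr (Or.inr (Or.inr (Or.inr (Or.inl (String.toList_inj.mp h)))))
    · exact Or.inr (Or.inr (Or.inr (Or.inr (Or.inr (String.toList_inj.mp h)))))
    · simp at h
  · rintro ⟨w, hs, hk⟩
    refine ⟨w.toList, List.mem_map_of_mem hk, ?_⟩
    simp only [sigChars, List.contains_eq_mem, decide_eq_true_eq]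
    fin_cases hs <;> simp

-- ===== VERDICT (by name: the statement is the Claim_ definition above) =====
theorem keyHasMemorySignal_spec : Claim_equal_keyHasMemorySignal := by
  intro k _
  unfold Spec_keyHasMemorySignal keyHasMemorySignal keyHasMemorySignal_alt
  rw [scan_eq, Bool.eq_iff_iff, loop_eq_true_iff]
  exact (scan_true_iff k).symm
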